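-- pv_equiv track=rewrite | github.com/vakomash/tyrant_optimize | ml/train.py | hash_to_ids_ext_b64
-- ===== SOURCE A (Python) =====
-- hash_cache = {}
--
-- def hash_to_ids_ext_b64(hash, nmin=12):
--     if hash in hash_cache:
--         ids = hash_cache[hash].copy()
--     else:
--         ids = []
--         c = 0
--         while c < len(hash):
--             # for pc in hash:
--             id = 0
--             factor = 1
--             p = base64_chars.find(hash[c])
--             if p == -1:
--                 raise RuntimeError("Invalid hash character")
--             d = p
--             while d < 32:
--                 id += factor * d
--                 factor *= 32
--                 c = c + 1
--                 pc = hash[c]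
--                 p = base64_chars.find(pc)
--                 if p == -1:
--                     raise RuntimeError("Invalid hash character")
--                 d = p
--             id += factor * (d - 32)
--             c = c + 1
--             ids.append(id)
--         hash_cache[hash] = ids
--         ids = ids.copy()
--     while len(ids) < nmin:
--         ids.append(0)
--     return ids
--
-- base64_chars = "ABCDEFGHIJKLMNOPQRSTUVWXYZabcdefghijklmnopqrstuvwxyz0123456789+/"
-- ===== SOURCE B (Python) =====
-- # B: one flat pass over the characters carrying running (id, factor) state,
-- # instead of nested while-loops with manual index arithmetic; padding by list
-- # multiplication. Return value is what the equivalence is about (both also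
-- # fill the module-level hash_cache).
-- hash_cache = {}
--
-- base64_chars = "ABCDEFGHIJKLMNOPQRSTUVWXYZabcdefghijklmnopqrstuvwxyz0123456789+/"
--
--
-- def hash_to_ids_ext_b64(hash, nmin=12):
--     if hash in hash_cache:
--         ids = hash_cache[hash].copy()
--     else:
--         ids = []
--         id = 0
--         factor = 1
--         for ch in hash:
--             v = base64_chars.find(ch)
--             if v == -1:
--                 raise RuntimeError("Invalid hash character")
--             if v < 32:
--                 id += factor * v
--                 factor *= 32
--             else:
--                 ids.append(id + factor * (v - 32))
--                 id = 0
--                 factor = 1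
--         hash_cache[hash] = ids
--         ids = ids.copy()
--     ids += [0] * (nmin - len(ids))
--     return ids
-- ===== Notes on version B (the rewrite author's own statement) =====
-- stated objective: simpler
-- what changed: Replaces A's nested while-loops with manual index arithmetic by one flat for-pass carrying running (id, factor) state and list-multiplication padding (fewer per-character index operations); Pre_ excludes the inputs on which A raises (a non-base64 character, or a hash ending mid-number, where A reads past the end).
import Mathlib
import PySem

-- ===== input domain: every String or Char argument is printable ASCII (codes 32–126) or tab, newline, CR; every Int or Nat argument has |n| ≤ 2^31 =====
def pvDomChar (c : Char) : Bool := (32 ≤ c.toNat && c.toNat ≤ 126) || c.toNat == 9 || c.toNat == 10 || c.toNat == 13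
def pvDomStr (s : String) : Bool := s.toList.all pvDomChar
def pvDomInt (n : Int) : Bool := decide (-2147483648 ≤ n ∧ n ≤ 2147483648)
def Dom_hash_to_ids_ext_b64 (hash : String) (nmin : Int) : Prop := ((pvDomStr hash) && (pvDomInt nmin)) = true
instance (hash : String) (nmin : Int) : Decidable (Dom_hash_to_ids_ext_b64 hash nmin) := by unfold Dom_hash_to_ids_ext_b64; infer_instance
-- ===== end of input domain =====

-- B replaces A's nested while-loops (manual index arithmetic) by one flat pass carrying
-- (id, factor) running state; return-value equivalence only — both Pythons also maintain
-- the module-level hash_cache, a side effect the cache-free ports ignore (it never changes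
-- the returned value).

-- ===== PORT A =====
-- shared helper: base64_chars.find(ch) for a single character ch (exact: 1-char needle)
def pvB64 : List Char := "ABCDEFGHIJKLMNOPQRSTUVWXYZabcdefghijklmnopqrstuvwxyz0123456789+/".toList

def pvFind (ch : Char) : Int := PySem.Chars.find pvB64 [ch]

-- A's inner 'while d < 32' loop (d already read) and outer 'while c < len(hash)' loop;
-- the index c becomes the list of not-yet-read characters; fuel only makes the mutual
-- recursion structural (it is never exhausted at the fuel the port supplies).
-- 'none' is exactly where Python A raises (RuntimeError on find = -1, IndexError on
-- reading past the end inside the inner loop).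
mutual
def pvAInner (fuel : Nat) (cs : List Char) (ids : List Int) (idv factor d : Int) :
    Option (List Int) :=
  match fuel with
  | 0 => none
  | fuel + 1 =>
    if d < 32 then
      let idv' := idv + factor * d
      let factor' := factor * 32
      match cs with
      | [] => none                      -- pc = hash[c] with c = len(hash): IndexError
      | pc :: rest =>
        let p := pvFind pc
        if p = -1 then none             -- RuntimeError("Invalid hash character")
        else pvAInner fuel rest ids idv' factor' p
    else pvAOuter fuel cs (ids ++ [idv + factor * (d - 32)])

def pvAOuter (fuel : Nat) (cs : List Char) (ids : List Int) : Option (List Int) :=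
  match fuel with
  | 0 => none
  | fuel + 1 =>
    match cs with
    | [] => some ids
    | ch :: rest =>
      let p := pvFind ch
      if p = -1 then none               -- RuntimeError("Invalid hash character")
      else pvAInner fuel rest ids 0 1 p
end

-- A's trailing 'while len(ids) < nmin: ids.append(0)'
def pvPadA (ids : List Int) (nmin : Int) : List Int :=
  if (ids.length : Int) < nmin then pvPadA (ids ++ [0]) nmin else ids
termination_by (nmin - (ids.length : Int)).toNat
decreasing_by simp at *; omega

def hash_to_ids_ext_b64 (hash : String) (nmin : Int) : List Int :=
  match pvAOuter (2 * hash.toList.length + 2) hash.toList [] with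
  | none => []                          -- Python raises here: outside Pre_
  | some ids => pvPadA ids nmin

-- ===== PORT B =====
-- one flat pass: fold the characters over state (ids, id, factor); 'none' = raised
def pvBStep (st : Option (List Int × Int × Int)) (ch : Char) :
    Option (List Int × Int × Int) :=
  match st with
  | none => none
  | some (ids, idv, factor) =>
    let v := pvFind ch
    if v = -1 then none                 -- RuntimeError("Invalid hash character")
    else if v < 32 then some (ids, idv + factor * v, factor * 32)
    else some (ids ++ [idv + factor * (v - 32)], 0, 1)

def hash_to_ids_ext_b64_alt (hash : String) (nmin : Int) : List Int :=
  match hash.toList.foldl pvBStep (some ([], 0, 1)) with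
  | none => []                          -- Python raises here (RuntimeError): outside Pre_
  | some (ids, _, _) => ids ++ List.replicate (nmin - (ids.length : Int)).toNat 0

-- ===== PRECONDITION & SPEC =====
-- Pre_: exactly the inputs on which Python A returns normally — every character of the
-- hash is a base64 character and the hash does not stop in the middle of a number,
-- i.e. it is empty or its last character encodes a terminating digit (value ≥ 32).
-- On the excluded inputs A raises RuntimeError (invalid character) or IndexError
-- (incomplete trailing number).
def Pre_hash_to_ids_ext_b64 (hash : String) (nmin : Int) : Prop :=
  hash.toList.all (fun c => pvFind c != -1) = true ∧
  hash.toList.getLast?.all (fun c => decide (32 ≤ pvFind c)) = true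
instance (hash : String) (nmin : Int) : Decidable (Pre_hash_to_ids_ext_b64 hash nmin) := by
  unfold Pre_hash_to_ids_ext_b64; infer_instance

def pvWitness_hash_to_ids_ext_b64 : String × Int := ("BAh", 4)

def Spec_hash_to_ids_ext_b64 (hash : String) (nmin : Int) (out : List Int) : Prop := out = hash_to_ids_ext_b64_alt hash nmin
instance (hash : String) (nmin : Int) (out : List Int) : Decidable (Spec_hash_to_ids_ext_b64 hash nmin out) := by unfold Spec_hash_to_ids_ext_b64; infer_instance

-- ===== CLAIM (what is proved, stated in full; the proofs are below) =====
def Claim_equal_hash_to_ids_ext_b64 : Prop := ∀ (hash : String) (nmin : Int), Dom_hash_to_ids_ext_b64 hash nmin → Pre_hash_to_ids_ext_b64 hash nmin → Spec_hash_to_ids_ext_b64 hash nmin (hash_to_ids_ext_b64 hash nmin)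

-- ===== LEMMAS AND PROOFS =====

-- how A's result reads B's fold state: A also demands the final factor be 1
def pvFinishB (st : Option (List Int × Int × Int)) : Option (List Int) :=
  match st with
  | none => none
  | some (ids, _, factor) => if factor = 1 then some ids else none

theorem pvBStep_none (cs : List Char) : cs.foldl pvBStep none = none := by
  induction cs with
  | nil => rfl
  | cons c cs ih => simpa [pvBStep] using ih

theorem pvAInner_eq (cs : List Char) : ∀ (fuel : Nat) (ids : List Int) (idv factor d : Int),
    2 * cs.length + 2 ≤ fuel →
    pvAInner fuel cs ids idv factor d =
      if d < 32 then pvFinishB (cs.foldl pvBStep (some (ids, idv + factor * d, factor * 32)))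
      else pvFinishB (cs.foldl pvBStep (some (ids ++ [idv + factor * (d - 32)], 0, 1))) := by
  induction cs with
  | nil =>
    intro fuel ids idv factor d hfuel
    obtain ⟨f, rfl⟩ : ∃ f, fuel = f + 1 := ⟨fuel - 1, by omega⟩
    by_cases hd : d < 32
    · have h32 : factor * 32 ≠ 1 := by
        intro h
        have : (32 : Int) ∣ 1 := ⟨factor, by linarith [h]⟩
        omega
      simp [pvAInner, hd, pvFinishB, h32]
    · obtain ⟨g, rfl⟩ : ∃ g, f = g + 1 := by
        cases f with
        | zero => simp only [List.length_nil] at hfuel; omega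
        | succ g => exact ⟨g, rfl⟩
      simp [pvAInner, hd, pvAOuter, pvFinishB]
  | cons pc rest ih =>
    intro fuel ids idv factor d hfuel
    obtain ⟨f, rfl⟩ : ∃ f, fuel = f + 1 := ⟨fuel - 1, by omega⟩
    by_cases hd : d < 32
    · by_cases hp : pvFind pc = -1
      · simp [pvAInner, hd, hp, List.foldl_cons, pvBStep, pvBStep_none, pvFinishB]
      · have hf : 2 * rest.length + 2 ≤ f := by simp only [List.length_cons] at hfuel; omega
        rw [show pvAInner (f + 1) (pc :: rest) ids idv factor d =
              pvAInner f rest ids (idv + factor * d) (factor * 32) (pvFind pc) by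
            simp [pvAInner, hd, hp]]
        rw [ih f ids (idv + factor * d) (factor * 32) (pvFind pc) hf]
        simp only [List.foldl_cons]
        by_cases hlt : pvFind pc < 32 <;> simp [pvBStep, hp, hlt, hd]
    · obtain ⟨g, rfl⟩ : ∃ g, f = g + 1 := by
        cases f with
        | zero => simp only [List.length_cons] at hfuel; omega
        | succ g => exact ⟨g, rfl⟩
      rw [show pvAInner (g + 1 + 1) (pc :: rest) ids idv factor d =
            pvAOuter (g + 1) (pc :: rest) (ids ++ [idv + factor * (d - 32)]) by
          simp [pvAInner, hd]]
      by_cases hp : pvFind pc = -1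
      · simp [pvAOuter, hp, hd, List.foldl_cons, pvBStep, pvBStep_none, pvFinishB]
      · have hg : 2 * rest.length + 2 ≤ g := by simp only [List.length_cons] at hfuel; omega
        rw [show pvAOuter (g + 1) (pc :: rest) (ids ++ [idv + factor * (d - 32)]) =
              pvAInner g rest (ids ++ [idv + factor * (d - 32)]) 0 1 (pvFind pc) by
            simp [pvAOuter, hp]]
        rw [ih g (ids ++ [idv + factor * (d - 32)]) 0 1 (pvFind pc) hg]
        simp only [List.foldl_cons]
        by_cases hlt : pvFind pc < 32 <;> simp [pvBStep, hp, hlt, hd]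

theorem pvAOuter_eq (cs : List Char) (fuel : Nat) (ids : List Int)
    (hfuel : 2 * cs.length + 1 ≤ fuel) :
    pvAOuter fuel cs ids = pvFinishB (cs.foldl pvBStep (some (ids, 0, 1))) := by
  obtain ⟨f, rfl⟩ : ∃ f, fuel = f + 1 := ⟨fuel - 1, by omega⟩
  cases cs with
  | nil => simp [pvAOuter, pvFinishB]
  | cons ch rest =>
    by_cases hp : pvFind ch = -1
    · simp [pvAOuter, hp, List.foldl_cons, pvBStep, pvBStep_none, pvFinishB]
    · have hf : 2 * rest.length + 2 ≤ f := by simp only [List.length_cons] at hfuel; omega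
      rw [show pvAOuter (f + 1) (ch :: rest) ids = pvAInner f rest ids 0 1 (pvFind ch) by
            simp [pvAOuter, hp]]
      rw [pvAInner_eq rest f ids 0 1 (pvFind ch) hf]
      simp only [List.foldl_cons]
      by_cases hlt : pvFind ch < 32 <;> simp [pvBStep, hp, hlt]

theorem pvPadA_eq (ids : List Int) (nmin : Int) :
    pvPadA ids nmin = ids ++ List.replicate (nmin - (ids.length : Int)).toNat 0 := by
  generalize hn : (nmin - (ids.length : Int)).toNat = n
  induction n generalizing ids with
  | zero =>
    rw [pvPadA]
    have : ¬ ((ids.length : Int) < nmin) := by omega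
    simp [this]
  | succ n ih =>
    rw [pvPadA]
    have hlt : (ids.length : Int) < nmin := by omega
    have hrec : (nmin - ((ids ++ [0]).length : Int)).toNat = n := by simp; omega
    simp only [hlt, if_true]
    rw [ih (ids ++ [0]) hrec]
    simp [List.replicate_succ, List.append_assoc]

-- on all-valid input the fold never becomes none
theorem pvFold_some (cs : List Char) (hv : cs.all (fun c => pvFind c != -1) = true) :
    ∀ st, ∃ r, cs.foldl pvBStep (some st) = some r := by
  induction cs with
  | nil => exact fun st => ⟨st, rfl⟩
  | cons c cs ih =>
    intro st
    simp only [List.all_cons, Bool.and_eq_true, bne_iff_ne] at hv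
    obtain ⟨hc, hrest⟩ := hv
    obtain ⟨ids, idv, factor⟩ := st
    simp only [List.foldl_cons, pvBStep, hc, if_neg hc]
    by_cases hlt : pvFind c < 32 <;> simp only [hlt, if_true, if_false, reduceIte] <;>
      exact ih (by simpa using hrest) _

-- under Pre_ the fold ends with factor = 1 (empty hash, or last step terminates a number)
theorem pvFold_factor_one (cs : List Char)
    (hv : cs.all (fun c => pvFind c != -1) = true)
    (hl : cs.getLast?.all (fun c => decide (32 ≤ pvFind c)) = true) :
    ∃ ids idv, cs.foldl pvBStep (some ([], 0, 1)) = some (ids, idv, 1) := by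
  cases hcs : cs.eq_nil_or_concat with
  | inl h => subst h; exact ⟨[], 0, rfl⟩
  | inr h =>
    obtain ⟨ys, c, rfl⟩ := h
    simp only [List.concat_eq_append] at hv hl ⊢
    have hvc : pvFind c ≠ -1 := by
      simp only [List.all_append, List.all_cons, Bool.and_eq_true, bne_iff_ne] at hv
      exact hv.2.1
    have hvy : ys.all (fun c => pvFind c != -1) = true := by
      simp only [List.all_append, Bool.and_eq_true] at hv; exact hv.1
    have hc32 : 32 ≤ pvFind c := by
      rw [List.getLast?_concat] at hl
      simpa using hl
    obtain ⟨⟨ids, idv, factor⟩, hr⟩ := pvFold_some ys hvy ([], 0, 1)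
    refine ⟨ids ++ [idv + factor * (pvFind c - 32)], 0, ?_⟩
    rw [List.foldl_append, hr]
    simp only [List.foldl_cons, List.foldl_nil, pvBStep]
    rw [if_neg hvc, if_neg (by omega)]

theorem pv_main (hash : String) (nmin : Int) (hpre : Pre_hash_to_ids_ext_b64 hash nmin) :
    hash_to_ids_ext_b64 hash nmin = hash_to_ids_ext_b64_alt hash nmin := by
  obtain ⟨hv, hl⟩ := hpre
  obtain ⟨ids, idv, hfold⟩ := pvFold_factor_one hash.toList hv hl
  unfold hash_to_ids_ext_b64 hash_to_ids_ext_b64_alt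
  rw [pvAOuter_eq hash.toList (2 * hash.toList.length + 2) [] (by omega), hfold]
  simp [pvFinishB, pvPadA_eq]

-- ===== VERDICT (by name: the statements are the Claim_ definitions above) =====
theorem hash_to_ids_ext_b64_spec : Claim_equal_hash_to_ids_ext_b64 := by
  intro hash nmin _ hpre
  unfold Spec_hash_to_ids_ext_b64
  exact pv_main hash nmin hpre
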